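-- pv_equiv track=rewrite | github.com/wzh220144/VideoStructuring | PipeLine/utils/utils.py | gen_ts_interval
-- ===== SOURCE A (Python) =====
-- def gen_ts_interval(frame_count, frames):
--     count = 0
--     if frame_count <= 0:
--         return
--     pre_index = 0
--     cur_index = 0
--     while True:
--         cur_index += 1
--         if cur_index >= frame_count:
--             break
--         if cur_index in frames:
--             yield pre_index, cur_index
--             count += 1
--             pre_index = cur_index
-- ===== SOURCE B (Python) =====
-- def gen_ts_interval(frame_count, frames):
--     ks = sorted({f for f in frames if 1 <= f < frame_count})
--     yield from zip([0] + ks, ks)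
-- ===== Notes on version B (the rewrite author's own statement) =====
-- stated objective: alternative
-- what changed: Instead of scanning every index 1..frame_count-1 and testing membership with a running prev variable, B sorts the unique frame values inside [1, frame_count-1] once and zips the list with its 0-prefixed shift to build the (prev, cur) pairs directly.
import Mathlib
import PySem

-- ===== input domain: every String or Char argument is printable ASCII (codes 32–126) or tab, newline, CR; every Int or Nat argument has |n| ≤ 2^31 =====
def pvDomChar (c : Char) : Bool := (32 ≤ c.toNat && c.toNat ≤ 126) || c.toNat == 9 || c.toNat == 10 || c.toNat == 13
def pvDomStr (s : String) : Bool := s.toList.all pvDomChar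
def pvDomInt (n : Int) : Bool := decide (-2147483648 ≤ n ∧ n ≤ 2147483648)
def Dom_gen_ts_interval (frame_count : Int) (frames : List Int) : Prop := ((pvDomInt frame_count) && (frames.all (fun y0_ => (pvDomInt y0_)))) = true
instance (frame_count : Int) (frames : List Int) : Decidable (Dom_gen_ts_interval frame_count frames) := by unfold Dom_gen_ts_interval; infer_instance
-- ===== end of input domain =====

-- B sorts the distinct frame values inside [1, frame_count-1] once and zips the result with its 0-prefixed shift, instead of scanning every index; the pair sequence is proved identical.
-- ===== PORT A =====
def gen_ts_interval (frame_count : Int) (frames : List Int) : List (Int × Int) :=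
  if frame_count ≤ 0 then []
  else
    -- while loop: cur_index runs over 1, 2, …, frame_count-1; state = (yielded pairs, pre_index)
    ((PySem.List.pyRange 1 frame_count 1).foldl
      (fun (st : List (Int × Int) × Int) cur =>
        if frames.contains cur then (st.1 ++ [(st.2, cur)], cur) else st)
      ([], 0)).1

-- ===== PORT B =====
def gen_ts_interval_alt (frame_count : Int) (frames : List Int) : List (Int × Int) :=
  let ks := PySem.List.sorted
      (PySem.Set.ofList (frames.filter (fun f => decide (1 ≤ f) && decide (f < frame_count))))
      (fun x => x) false
  List.zip ((0 : Int) :: ks) ks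

-- ===== PRECONDITION & SPEC =====
def Spec_gen_ts_interval (frame_count : Int) (frames : List Int) (out : List (Int × Int)) : Prop := out = gen_ts_interval_alt frame_count frames
instance (frame_count : Int) (frames : List Int) (out : List (Int × Int)) : Decidable (Spec_gen_ts_interval frame_count frames out) := by unfold Spec_gen_ts_interval; infer_instance

-- ===== CLAIM (what is proved, stated in full; the proofs are below) =====
def Claim_equal_gen_ts_interval : Prop := ∀ (frame_count : Int) (frames : List Int), Dom_gen_ts_interval frame_count frames → Spec_gen_ts_interval frame_count frames (gen_ts_interval frame_count frames)

-- ===== LEMMAS AND PROOFS =====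

-- A's conditional fold folds only over the elements passing the test
lemma foldl_emit_filter (l : List Int) (p : Int → Bool) (acc : List (Int × Int)) (pre : Int) :
    l.foldl (fun (st : List (Int × Int) × Int) cur =>
        if p cur then (st.1 ++ [(st.2, cur)], cur) else st) (acc, pre)
    = (l.filter p).foldl (fun (st : List (Int × Int) × Int) cur =>
        (st.1 ++ [(st.2, cur)], cur)) (acc, pre) := by
  induction l generalizing acc pre with
  | nil => rfl
  | cons x xs ih =>
    by_cases hx : p x <;> simp [List.foldl_cons, hx, ih]

-- the unconditional emit fold is the zip of the list with its pre-prefixed shift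
lemma foldl_emit_zip (l : List Int) (acc : List (Int × Int)) (pre : Int) :
    (l.foldl (fun (st : List (Int × Int) × Int) cur =>
        (st.1 ++ [(st.2, cur)], cur)) (acc, pre)).1
    = acc ++ List.zip (pre :: l) l := by
  induction l generalizing acc pre with
  | nil => simp
  | cons x xs ih => simp [List.foldl_cons, ih]

-- two strictly increasing lists with the same members are equal
lemma strict_sorted_ext (l₁ l₂ : List Int) (h₁ : l₁.Pairwise (· < ·))
    (h₂ : l₂.Pairwise (· < ·)) (hm : ∀ x, x ∈ l₁ ↔ x ∈ l₂) : l₁ = l₂ := by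
  have hperm : l₁.Perm l₂ := by
    rw [List.perm_ext_iff_of_nodup
      (h₁.imp (fun h => ne_of_lt h)) (h₂.imp (fun h => ne_of_lt h))]
    exact hm
  exact hperm.eq_of_pairwise (fun a b _ _ hab hba => absurd hba (lt_asymm hab)) h₁ h₂

-- the filtered index range IS the sorted deduplicated filtered frame list
lemma range_filter_eq_sorted (frame_count : Int) (frames : List Int) :
    (PySem.List.pyRange 1 frame_count 1).filter (fun c => frames.contains c)
    = PySem.List.sorted
        (PySem.Set.ofList (frames.filter (fun f => decide (1 ≤ f) && decide (f < frame_count))))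
        (fun x => x) false := by
  apply strict_sorted_ext
  · exact (PySem.List.pairwise_lt_pyRange_one 1 frame_count).filter _
  · exact PySem.List.sorted_ofList_pairwise_lt _
  · intro x
    simp [List.mem_filter, PySem.List.mem_pyRange_one, PySem.List.mem_sorted,
      PySem.Set.mem_ofList]
    tauto

-- ===== VERDICT (by name: the statement is the Claim_ definition above) =====
theorem gen_ts_interval_spec : Claim_equal_gen_ts_interval := by
  intro frame_count frames _
  unfold Spec_gen_ts_interval gen_ts_interval gen_ts_interval_alt
  rw [foldl_emit_filter, foldl_emit_zip, range_filter_eq_sorted]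
  split_ifs with h
  · -- frame_count ≤ 0: the filtered frame list is empty, so B zips empty lists
    have : frames.filter (fun f => decide (1 ≤ f) && decide (f < frame_count)) = [] := by
      apply List.filter_eq_nil_iff.mpr
      intro a _
      simp only [Bool.and_eq_true, decide_eq_true_eq, not_and]
      intro h1 h2; omega
    rw [this]
    rfl
  · rfl
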